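-- pv_equiv track=rewrite | github.com/3ichael7ambert/23-2-data-structures | 11_flip_case/flip_case.py | flip_case
-- ===== SOURCE A (Python) =====
-- def flip_case(phrase, to_swap):
--     """Flip [to_swap] case each time it appears in phrase.
--
--         >>> flip_case('Aaaahhh', 'a')
--         'aAAAhhh'
--
--         >>> flip_case('Aaaahhh', 'A')
--         'aAAAhhh'
--
--         >>> flip_case('Aaaahhh', 'h')
--         'AaaaHHH'
--
--     """
--     newPhrase=""
--     for char in phrase:
--         if char.lower()==to_swap.lower():
--             newPhrase+=char.swapcase()
--         else:
--             newPhrase+=char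
--     return newPhrase
-- ===== SOURCE B (Python) =====
-- def flip_case(phrase, to_swap):
--     target = to_swap.lower()
--     table = str.maketrans({c: c.swapcase() for c in set(phrase) if c.lower() == target})
--     return phrase.translate(table)
-- ===== Notes on version B (the rewrite author's own statement) =====
-- stated objective: faster
-- what changed: B precomputes a translation table (str.maketrans over the distinct characters of phrase matching to_swap case-insensitively) and returns phrase.translate(table), replacing A's char-by-char if/else loop that re-lowers to_swap and concatenates strings each iteration.
import Mathlib
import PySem

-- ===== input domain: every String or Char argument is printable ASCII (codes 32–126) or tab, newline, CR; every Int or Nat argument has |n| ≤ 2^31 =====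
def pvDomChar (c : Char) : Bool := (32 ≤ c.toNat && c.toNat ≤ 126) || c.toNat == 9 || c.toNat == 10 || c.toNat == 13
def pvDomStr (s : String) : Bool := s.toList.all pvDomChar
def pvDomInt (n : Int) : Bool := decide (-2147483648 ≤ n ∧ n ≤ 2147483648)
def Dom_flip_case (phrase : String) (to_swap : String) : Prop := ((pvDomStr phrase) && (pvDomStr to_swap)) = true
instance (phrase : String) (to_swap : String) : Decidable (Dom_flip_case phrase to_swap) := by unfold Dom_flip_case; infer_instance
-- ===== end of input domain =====

-- B replaces A's char-by-char if/else concatenation loop with a precomputed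
-- str.maketrans translation table driven through phrase.translate (idiomatic).


-- ===== PORT A =====
-- c.swapcase() for one ASCII character (exact on the printable-ASCII domain)
def pvSwapChar (c : Char) : Char :=
  if PySem.Chars.isupper c then PySem.Chars.lowerChar c
  else if PySem.Chars.islower c then PySem.Chars.upperChar c
  else c

def flip_case (phrase : String) (to_swap : String) : String :=
  String.mk (phrase.toList.foldl
    (fun newPhrase char =>
      if PySem.Chars.lower [char] == PySem.Chars.lower to_swap.toList then
        newPhrase ++ [pvSwapChar char]
      else
        newPhrase ++ [char]) [])

-- ===== PORT B =====
def flip_case_alt (phrase : String) (to_swap : String) : String :=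
  let target := PySem.Chars.lower to_swap.toList
  let table : PySem.Dict Char Char :=
    (PySem.Set.ofList phrase.toList).foldl
      (fun d c => if PySem.Chars.lower [c] == target then d.insert c (pvSwapChar c) else d) ∅
  String.mk (phrase.toList.map (fun c => table.getD c c))

-- ===== PRECONDITION & SPEC =====
def Spec_flip_case (phrase : String) (to_swap : String) (out : String) : Prop := out = flip_case_alt phrase to_swap
instance (phrase : String) (to_swap : String) (out : String) : Decidable (Spec_flip_case phrase to_swap out) := by unfold Spec_flip_case; infer_instance

-- ===== CLAIM (what is proved, stated in full; the proofs are below) =====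
def Claim_equal_flip_case : Prop := ∀ (phrase : String) (to_swap : String), Dom_flip_case phrase to_swap → Spec_flip_case phrase to_swap (flip_case phrase to_swap)

-- ===== LEMMAS AND PROOFS =====

-- lookup in the table built by B's conditional-insert fold, for value depending only on the key
theorem pv_getD_foldl_condInsert (p : Char → Bool) (v : Char → Char)
    (l : List Char) (d : PySem.Dict Char Char) (c dflt : Char) :
    (l.foldl (fun d x => if p x then d.insert x (v x) else d) d).getD c dflt
      = if c ∈ l ∧ p c then v c else d.getD c dflt := by
  induction l generalizing d with
  | nil => simp
  | cons x l ih =>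
    simp only [List.foldl_cons, ih]
    by_cases hm : c ∈ l ∧ p c
    · simp [hm]
    · by_cases hx : c = x
      · subst hx
        by_cases hp : p c <;> simp [hp]
      · by_cases hp : p x <;> simp [hp, hm, hx, PySem.Dict.getD_insert]

theorem pv_ports_agree (phrase to_swap : String) :
    flip_case phrase to_swap = flip_case_alt phrase to_swap := by
  unfold flip_case flip_case_alt
  have hA : phrase.toList.foldl
      (fun newPhrase char =>
        if PySem.Chars.lower [char] == PySem.Chars.lower to_swap.toList then
          newPhrase ++ [pvSwapChar char]
        else
          newPhrase ++ [char]) []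
      = phrase.toList.map
          (fun c => if PySem.Chars.lower [c] == PySem.Chars.lower to_swap.toList then
              pvSwapChar c else c) := by
    have hbody : (fun (newPhrase : List Char) (char : Char) =>
        if PySem.Chars.lower [char] == PySem.Chars.lower to_swap.toList then
          newPhrase ++ [pvSwapChar char]
        else
          newPhrase ++ [char])
        = fun newPhrase char => newPhrase ++
            [if PySem.Chars.lower [char] == PySem.Chars.lower to_swap.toList then
              pvSwapChar char else char] := by
      funext acc c; by_cases h : PySem.Chars.lower [c] == PySem.Chars.lower to_swap.toList <;> simp [h]
    rw [hbody, PySem.List.foldl_append_singleton_eq_map]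
    simp
  rw [hA]
  congr 1
  apply List.map_congr_left
  intro c hc
  rw [pv_getD_foldl_condInsert]
  by_cases h : PySem.Chars.lower [c] == PySem.Chars.lower to_swap.toList
  · simp [h, (PySem.Set.mem_ofList _ _).mpr hc]
  · simp [h, PySem.Dict.getD, PySem.Dict.get?, PySem.Dict.empty, EmptyCollection.emptyCollection]

-- ===== VERDICT (by name: the statement is the Claim_ definition above) =====
theorem flip_case_spec : Claim_equal_flip_case := by
  intro phrase to_swap _
  unfold Spec_flip_case
  exact pv_ports_agree phrase to_swap
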